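-- pv_equiv track=rewrite | github.com/benwatson528/advent-of-code-21 | main/day09/smoke_basin.py | solve_basins_rec
-- ===== SOURCE A (Python) =====
-- def solve_basins_rec(grid, current, visited, basin_locations):
--     (y, x) = current
--     for new_y, new_x in ((y - 1, x), (y + 1, x), (y, x - 1), (y, x + 1)):
--         if 0 <= new_y < len(grid) \
--                 and 0 <= new_x < len(grid[new_y]) \
--                 and (new_y, new_x) not in visited \
--                 and grid[new_y][new_x] > grid[y][x] \
--                 and grid[new_y][new_x] != 9:
--             visited.add(current)
--             basin_locations.add((new_y, new_x))
--             solve_basins_rec(grid, (new_y, new_x), visited, basin_locations)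
--     return basin_locations
-- ===== SOURCE B (Python) =====
-- def solve_basins_rec(grid, current, visited, basin_locations):
--     # Iterative explicit-stack DFS (same traversal order and same in-place
--     # mutations of visited/basin_locations as the recursive original).
--     def neighbours(y, x):
--         return [(y - 1, x), (y + 1, x), (y, x - 1), (y, x + 1)]
--
--     def qualifies(cell, nb):
--         ny, nx = nb
--         if not (0 <= ny < len(grid)):
--             return False
--         row = grid[ny]
--         if not (0 <= nx < len(row)):
--             return False
--         if nb in visited:
--             return False
--         height = row[nx]
--         return height > grid[cell[0]][cell[1]] and height != 9
--
--     stack = [(current, neighbours(*current))]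
--     while stack:
--         cell, pending = stack.pop()
--         if not pending:
--             continue
--         nb, rest = pending[0], pending[1:]
--         if qualifies(cell, nb):
--             visited.add(cell)
--             basin_locations.add(nb)
--             stack.append((cell, rest))
--             stack.append((nb, neighbours(*nb)))
--         else:
--             stack.append((cell, rest))
--     return basin_locations
-- ===== Notes on version B (the rewrite author's own statement) =====
-- stated objective: alternative
-- what changed: Replaces A's self-recursive DFS with an iterative explicit-stack loop (same traversal order and same in-place set mutations), removing Python call recursion and its recursion-limit.
import Mathlib
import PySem

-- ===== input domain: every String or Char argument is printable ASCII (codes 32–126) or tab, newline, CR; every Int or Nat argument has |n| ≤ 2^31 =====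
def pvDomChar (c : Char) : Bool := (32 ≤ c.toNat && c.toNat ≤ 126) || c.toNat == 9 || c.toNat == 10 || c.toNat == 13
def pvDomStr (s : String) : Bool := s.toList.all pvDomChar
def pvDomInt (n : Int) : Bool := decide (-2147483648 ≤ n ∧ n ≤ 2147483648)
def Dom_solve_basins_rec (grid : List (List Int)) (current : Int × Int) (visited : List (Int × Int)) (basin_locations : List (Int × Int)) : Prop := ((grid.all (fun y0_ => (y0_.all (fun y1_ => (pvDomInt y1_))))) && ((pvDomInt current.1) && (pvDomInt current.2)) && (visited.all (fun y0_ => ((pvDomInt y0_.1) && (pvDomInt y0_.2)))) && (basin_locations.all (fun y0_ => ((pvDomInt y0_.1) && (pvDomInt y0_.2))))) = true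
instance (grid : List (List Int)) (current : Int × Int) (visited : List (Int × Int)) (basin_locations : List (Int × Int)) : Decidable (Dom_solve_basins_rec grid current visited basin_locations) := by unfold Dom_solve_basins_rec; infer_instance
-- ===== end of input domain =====

-- B replaces A's self-recursion by an iterative explicit-stack DFS with the same traversal
-- order and the same in-place mutations of `visited`/`basin_locations` (objective: alternative
-- decomposition, no Python recursion); equivalence here is about the returned set.

-- ===== PORT A =====
-- shared helpers: the neighbour tuple and the qualification test of the `if` (both Pythons use the same condition)
def pvDirs (c : Int × Int) : List (Int × Int) :=
  [(c.1 - 1, c.2), (c.1 + 1, c.2), (c.1, c.2 - 1), (c.1, c.2 + 1)]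

-- grid[y][x] with Python index semantics (negative wrap; none = IndexError)
def pvValAt (grid : List (List Int)) (y x : Int) : Option Int :=
  (PySem.List.pyGet? grid y).bind (fun row => PySem.List.pyGet? row x)

-- the five-conjunct condition of A's (and B's) `if`, evaluated left to right
def pvQualifies (grid : List (List Int)) (v : PySem.Set (Int × Int)) (cur nb : Int × Int) : Bool :=
  decide (0 ≤ nb.1) && decide (nb.1 < (grid.length : Int)) &&
  (match PySem.List.pyGet? grid nb.1 with
   | some row =>
     decide (0 ≤ nb.2) && decide (nb.2 < (row.length : Int)) &&
     !(PySem.Set.contains v nb) &&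
     (match PySem.List.pyGet? row nb.2, pvValAt grid cur.1 cur.2 with
      | some nv, some cv => decide (cv < nv) && decide (nv ≠ 9)
      | _, _ => false)
   | none => false)

-- fuel bound: recursion depth is at most the number of grid cells (each nesting level
-- consumes a fresh unvisited in-bounds cell), so this fuel is never exhausted
def pvFuel (grid : List (List Int)) : Nat := (grid.map List.length).sum + 1

-- A's recursion; `f` is the fuel available to children of `c`, `ns` the neighbours still to scan
def pvGoA (grid : List (List Int)) :
    Nat → (Int × Int) → List (Int × Int) → PySem.Set (Int × Int) → PySem.Set (Int × Int) →
    PySem.Set (Int × Int) × PySem.Set (Int × Int)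
  | _, _, [], v, b => (v, b)
  | 0, c, n :: ns, v, b =>
      if pvQualifies grid v c n then
        pvGoA grid 0 c ns (PySem.Set.add v c) (PySem.Set.add b n)
      else pvGoA grid 0 c ns v b
  | f + 1, c, n :: ns, v, b =>
      if pvQualifies grid v c n then
        let p := pvGoA grid f n (pvDirs n) (PySem.Set.add v c) (PySem.Set.add b n)
        pvGoA grid (f + 1) c ns p.1 p.2
      else pvGoA grid (f + 1) c ns v b
  termination_by f _ ns _ _ => (f, ns.length)

def solve_basins_rec (grid : List (List Int)) (current : Int × Int) (visited : List (Int × Int)) (basin_locations : List (Int × Int)) : List (Int × Int) :=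
  (pvGoA grid (pvFuel grid) current (pvDirs current) visited basin_locations).2

-- ===== PORT B =====
-- the explicit stack: frames (fuel guard, cell, neighbours still pending)
def pvRunB (grid : List (List Int)) :
    List (Nat × (Int × Int) × List (Int × Int)) → PySem.Set (Int × Int) → PySem.Set (Int × Int) →
    PySem.Set (Int × Int)
  | [], _, b => b
  | (_, _, []) :: K, v, b => pvRunB grid K v b
  | (f, c, n :: ns) :: K, v, b =>
      if pvQualifies grid v c n then
        match f with
        | 0 => pvRunB grid ((0, c, ns) :: K) (PySem.Set.add v c) (PySem.Set.add b n)
        | f' + 1 =>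
            pvRunB grid ((f', n, pvDirs n) :: (f' + 1, c, ns) :: K)
              (PySem.Set.add v c) (PySem.Set.add b n)
      else pvRunB grid ((f, c, ns) :: K) v b
  termination_by K _ _ => (K.map (fun fr => fr.2.2.length * 6 ^ fr.1 + 1)).sum
  decreasing_by
  all_goals simp [pvDirs]
  all_goals
    rename_i f'
    have h1 : 1 ≤ 6 ^ f' := Nat.one_le_pow f' 6 (by omega)
    have h2 : 6 ^ (f' + 1) = 6 ^ f' * 6 := pow_succ 6 f'
    nlinarith [h1, h2]

def solve_basins_rec_alt (grid : List (List Int)) (current : Int × Int) (visited : List (Int × Int)) (basin_locations : List (Int × Int)) : List (Int × Int) :=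
  pvRunB grid [(pvFuel grid, current, pvDirs current)] visited basin_locations

-- ===== PRECONDITION & SPEC =====
-- Pre_ excludes exactly the inputs where A raises an IndexError: `current` is not a valid
-- Python index into the grid, yet some neighbour passes the bounds-and-visited checks so
-- that grid[y][x] gets evaluated.
def Pre_solve_basins_rec (grid : List (List Int)) (current : Int × Int) (visited : List (Int × Int)) (basin_locations : List (Int × Int)) : Prop :=
  (pvValAt grid current.1 current.2).isSome = true ∨
  ∀ n ∈ pvDirs current,
    ¬(0 ≤ n.1 ∧ n.1 < (grid.length : Int) ∧
      0 ≤ n.2 ∧ n.2 < ((((PySem.List.pyGet? grid n.1).getD []).length : Int)) ∧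
      n ∉ visited)
instance (grid : List (List Int)) (current : Int × Int) (visited : List (Int × Int)) (basin_locations : List (Int × Int)) : Decidable (Pre_solve_basins_rec grid current visited basin_locations) := by unfold Pre_solve_basins_rec; infer_instance

def pvWitness_solve_basins_rec : List (List Int) × (Int × Int) × (List (Int × Int)) × (List (Int × Int)) :=
  ([[1, 2], [9, 3]], (0, 0), [], [])

def Spec_solve_basins_rec (grid : List (List Int)) (current : Int × Int) (visited : List (Int × Int)) (basin_locations : List (Int × Int)) (out : List (Int × Int)) : Prop := out = solve_basins_rec_alt grid current visited basin_locations
instance (grid : List (List Int)) (current : Int × Int) (visited : List (Int × Int)) (basin_locations : List (Int × Int)) (out : List (Int × Int)) : Decidable (Spec_solve_basins_rec grid current visited basin_locations out) := by unfold Spec_solve_basins_rec; infer_instance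

-- ===== CLAIM (what is proved, stated in full; the proofs are below) =====
def Claim_equal_solve_basins_rec : Prop := ∀ (grid : List (List Int)) (current : Int × Int) (visited : List (Int × Int)) (basin_locations : List (Int × Int)), Dom_solve_basins_rec grid current visited basin_locations → Pre_solve_basins_rec grid current visited basin_locations → Spec_solve_basins_rec grid current visited basin_locations (solve_basins_rec grid current visited basin_locations)

-- ===== LEMMAS AND PROOFS =====
-- simulation: running the top stack frame is exactly one call of A's recursion
lemma pvRunB_frame (grid : List (List Int)) :
    ∀ (f : Nat) (ns : List (Int × Int)) (c : Int × Int)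
      (K : List (Nat × (Int × Int) × List (Int × Int))) (v b : PySem.Set (Int × Int)),
      pvRunB grid ((f, c, ns) :: K) v b =
        pvRunB grid K (pvGoA grid f c ns v b).1 (pvGoA grid f c ns v b).2 := by
  intro f
  induction f with
  | zero =>
    intro ns
    induction ns with
    | nil => intro c K v b; simp [pvRunB, pvGoA]
    | cons n ns ih =>
      intro c K v b
      by_cases h : pvQualifies grid v c n = true
      · simp [pvRunB, pvGoA, h, ih]
      · simp [pvRunB, pvGoA, h, ih]
  | succ f' ihf =>
    intro ns
    induction ns with
    | nil => intro c K v b; simp [pvRunB, pvGoA]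
    | cons n ns ih =>
      intro c K v b
      by_cases h : pvQualifies grid v c n = true
      · have step : pvRunB grid ((f' + 1, c, n :: ns) :: K) v b =
            pvRunB grid ((f', n, pvDirs n) :: (f' + 1, c, ns) :: K)
              (PySem.Set.add v c) (PySem.Set.add b n) := by
          simp [pvRunB, h]
        rw [step, ihf, ih]
        simp [pvGoA, h]
      · simp [pvRunB, pvGoA, h, ih]

-- ===== VERDICT (by name: the statement is the Claim_ definition above) =====
theorem solve_basins_rec_spec : Claim_equal_solve_basins_rec := by
  intro grid current visited basin_locations _dom _pre
  unfold Spec_solve_basins_rec solve_basins_rec solve_basins_rec_alt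
  rw [pvRunB_frame]
  simp [pvRunB]
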